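-- pv_equiv track=rewrite | github.com/leylabernie/luxemiashop | build_boutique_csv.py | extract_occasion
-- ===== SOURCE A (Python) =====
-- def extract_occasion(name):
--     occasions = [('Wedding Wear', 'wedding celebrations'), ('Festival Wear', 'festive celebrations'),
--                  ('Party Wear', 'celebrations and parties'), ('Casual Wear', 'everyday elegance'),
--                  ('Occasional Wear', 'special occasions'), ('Groom Wear', 'groom celebrations')]
--     for keyword, label in sorted(occasions, key=lambda x: len(x[0]), reverse=True):
--         if keyword.lower() in name.lower():
--             return keyword, label
--     return 'Special Occasions', 'special occasions'
-- ===== SOURCE B (Python) =====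
-- def extract_occasion(name):
--     occasions = [('Wedding Wear', 'wedding celebrations'), ('Festival Wear', 'festive celebrations'),
--                  ('Party Wear', 'celebrations and parties'), ('Casual Wear', 'everyday elegance'),
--                  ('Occasional Wear', 'special occasions'), ('Groom Wear', 'groom celebrations')]
--     lname = name.lower()
--     matches = [(kw, label) for kw, label in occasions if kw.lower() in lname]
--     if matches:
--         return max(matches, key=lambda m: len(m[0]))
--     return 'Special Occasions', 'special occasions'
-- ===== Notes on version B (the rewrite author's own statement) =====
-- stated objective: simpler
-- what changed: Replaced A's sort-by-length-then-first-match scan with a filter of the matching (keyword,label) pairs in original order followed by max over keyword length (first maximal element reproduces the longest-match, original-order tie-break).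
import Mathlib
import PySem

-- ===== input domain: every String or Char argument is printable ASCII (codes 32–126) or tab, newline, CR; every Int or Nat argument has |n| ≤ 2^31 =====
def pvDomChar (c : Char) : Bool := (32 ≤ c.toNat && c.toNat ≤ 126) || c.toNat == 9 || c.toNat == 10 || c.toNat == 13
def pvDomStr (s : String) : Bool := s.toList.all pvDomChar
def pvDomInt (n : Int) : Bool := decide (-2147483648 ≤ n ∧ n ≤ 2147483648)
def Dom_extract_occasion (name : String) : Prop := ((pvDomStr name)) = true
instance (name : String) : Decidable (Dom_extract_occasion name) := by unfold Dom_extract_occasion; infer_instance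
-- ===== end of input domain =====

-- B replaces A's sort-then-first-match scan by a filter of the matching pairs followed by
-- max over keyword length (first maximal reproduces the original-order tie-break): simpler, no sort.

-- ===== PORT A =====
def pvOccasions : List (String × String) :=
  [("Wedding Wear", "wedding celebrations"), ("Festival Wear", "festive celebrations"),
   ("Party Wear", "celebrations and parties"), ("Casual Wear", "everyday elegance"),
   ("Occasional Wear", "special occasions"), ("Groom Wear", "groom celebrations")]

-- A's for-loop with early return
def pvLoopA (name : String) : List (String × String) → String × String
  | [] => ("Special Occasions", "special occasions")
  | (keyword, label) :: rest =>
      if PySem.Str.isIn (PySem.Str.lower keyword) (PySem.Str.lower name) then (keyword, label)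
      else pvLoopA name rest

def extract_occasion (name : String) : String × String :=
  pvLoopA name (PySem.List.sorted pvOccasions (fun x => PySem.Str.len x.1) true)

-- ===== PORT B =====
def extract_occasion_alt (name : String) : String × String :=
  let lname := PySem.Str.lower name
  let matched := pvOccasions.filter (fun p => PySem.Str.isIn (PySem.Str.lower p.1) lname)
  match PySem.List.max? matched (fun m => PySem.Str.len m.1) with
  | some m => m
  | none => ("Special Occasions", "special occasions")

-- ===== PRECONDITION & SPEC =====
def Spec_extract_occasion (name : String) (out : String × String) : Prop := out = extract_occasion_alt name
instance (name : String) (out : String × String) : Decidable (Spec_extract_occasion name out) := by unfold Spec_extract_occasion; infer_instance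

-- ===== CLAIM (what is proved, stated in full; the proofs are below) =====
def Claim_equal_extract_occasion : Prop := ∀ (name : String), Dom_extract_occasion name → Spec_extract_occasion name (extract_occasion name)

-- ===== LEMMAS AND PROOFS =====

-- the sorted order of the six fixed pairs, named explicitly
lemma pvSorted_occasions :
    PySem.List.sorted pvOccasions (fun x => PySem.Str.len x.1) true =
    [("Occasional Wear", "special occasions"), ("Festival Wear", "festive celebrations"),
     ("Wedding Wear", "wedding celebrations"), ("Casual Wear", "everyday elegance"),
     ("Party Wear", "celebrations and parties"), ("Groom Wear", "groom celebrations")] := by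
  decide

-- ===== VERDICT (by name: the statement is the Claim_ definition above) =====
theorem extract_occasion_spec : Claim_equal_extract_occasion := by
  intro name _
  unfold Spec_extract_occasion extract_occasion extract_occasion_alt
  rw [pvSorted_occasions]
  by_cases h1 : PySem.Str.isIn (PySem.Str.lower "Occasional Wear") (PySem.Str.lower name) = true <;>
  by_cases h2 : PySem.Str.isIn (PySem.Str.lower "Festival Wear") (PySem.Str.lower name) = true <;>
  by_cases h3 : PySem.Str.isIn (PySem.Str.lower "Wedding Wear") (PySem.Str.lower name) = true <;>
  by_cases h4 : PySem.Str.isIn (PySem.Str.lower "Casual Wear") (PySem.Str.lower name) = true <;>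
  by_cases h5 : PySem.Str.isIn (PySem.Str.lower "Party Wear") (PySem.Str.lower name) = true <;>
  by_cases h6 : PySem.Str.isIn (PySem.Str.lower "Groom Wear") (PySem.Str.lower name) = true <;>
  (try simp_all [pvLoopA, pvOccasions]) <;> decide
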